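-- pv_equiv track=rewrite | github.com/aaron-jencks/ipa-gpt-interpret | util/parsing.py | identify_phonemes
-- ===== SOURCE A (Python) =====
-- from typing import List, Set, Dict
--
-- def identify_phonemes(s: str, phonemes: Set[str]) -> List[str]:
--     """
--     takes a string and returns the list of phonemes present in that string
--     assumes that any character that is not a phoneme represents a word/phoneme boundary
--     also assumes that any character that does represent a phoneme is indeed a phoneme
--     also assumes that the first and last characters are at boundaries
--     :param s: string to separate into phonemes
--     :param phonemes: The set of valid phonemes
--     :return: a list of strings representing phonemes
--     """
--     result = []
--     current = ''
--     for c in s: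
--         if c not in phonemes:
--             if len(current) > 0:
--                 result.append(current)
--             current = ''
--             continue
--         temp = current + c
--         if temp not in phonemes:
--             result.append(current)
--             current = c
--         else:
--             current = temp
--     if len(current) > 0:
--         result.append(current)
--     return result
-- ===== SOURCE B (Python) =====
-- from typing import List, Set
--
--
-- def identify_phonemes(s: str, phonemes: Set[str]) -> List[str]:
--     # Two-phase: split s into maximal runs of phoneme characters, then
--     # greedily tokenize each run independently.
--     segments = []
--     run = ''
--     for c in s:
--         if c in phonemes:
--             run += c
--         else:
--             if run:
--                 segments.append(run)
--             run = ''
--     if run: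
--         segments.append(run)
--
--     result = []
--     for seg in segments:
--         current = seg[0]
--         for c in seg[1:]:
--             if current + c in phonemes:
--                 current += c
--             else:
--                 result.append(current)
--                 current = c
--         result.append(current)
--     return result
-- ===== Notes on version B (the rewrite author's own statement) =====
-- stated objective: alternative
-- what changed: B first splits the string into maximal runs of characters that are themselves phonemes (boundary characters removed), then greedily tokenizes each run independently, instead of A's single flat stateful loop interleaving boundary handling and greedy extension.
import Mathlib
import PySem

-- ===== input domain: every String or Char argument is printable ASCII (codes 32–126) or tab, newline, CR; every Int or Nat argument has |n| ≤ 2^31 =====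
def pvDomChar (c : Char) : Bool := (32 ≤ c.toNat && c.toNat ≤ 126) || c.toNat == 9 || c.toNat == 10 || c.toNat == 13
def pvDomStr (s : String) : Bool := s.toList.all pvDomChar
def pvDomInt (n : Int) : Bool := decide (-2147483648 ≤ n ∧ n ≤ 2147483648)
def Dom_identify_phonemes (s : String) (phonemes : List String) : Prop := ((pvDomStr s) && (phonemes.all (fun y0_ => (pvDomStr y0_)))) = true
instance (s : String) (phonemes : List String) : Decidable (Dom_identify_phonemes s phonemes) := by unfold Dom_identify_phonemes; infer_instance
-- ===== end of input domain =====

-- B replaces A's single flat stateful loop by a two-phase decomposition (split into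
-- maximal phoneme-character runs, then greedily tokenize each run); objective: alternative.

-- ===== PORT A =====
-- A's loop state: (result, current); current kept as List Char, tokens as String.
def aStep (phonemes : List String) (st : List String × List Char) (c : Char) :
    List String × List Char :=
  if String.ofList [c] ∉ phonemes then
    (if st.2.length > 0 then st.1 ++ [String.ofList st.2] else st.1, [])
  else
    let temp := st.2 ++ [c]
    if String.ofList temp ∉ phonemes then (st.1 ++ [String.ofList st.2], [c])
    else (st.1, temp)

def identify_phonemes (s : String) (phonemes : List String) : List String :=
  let p := s.toList.foldl (aStep phonemes) ([], [])
  if p.2.length > 0 then p.1 ++ [String.ofList p.2] else p.1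

-- ===== PORT B =====
-- Phase 1 loop state: (segments, run).
def p1step (phonemes : List String) (st : List (List Char) × List Char) (c : Char) :
    List (List Char) × List Char :=
  if String.ofList [c] ∈ phonemes then (st.1, st.2 ++ [c])
  else (if st.2 ≠ [] then st.1 ++ [st.2] else st.1, [])

-- Phase 2 inner loop state: (result, current).
def gstep (phonemes : List String) (st : List String × List Char) (c : Char) :
    List String × List Char :=
  let temp := st.2 ++ [c]
  if String.ofList temp ∈ phonemes then (st.1, temp)
  else (st.1 ++ [String.ofList st.2], [c])

-- Phase 2 outer loop body: tokenize one (nonempty) segment.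
def gseg (phonemes : List String) (out : List String) (seg : List Char) : List String :=
  match seg with
  | [] => out
  | c :: rest =>
    let p := rest.foldl (gstep phonemes) (out, [c])
    p.1 ++ [String.ofList p.2]

def identify_phonemes_alt (s : String) (phonemes : List String) : List String :=
  let p := s.toList.foldl (p1step phonemes) ([], [])
  let segs := if p.2 ≠ [] then p.1 ++ [p.2] else p.1
  segs.foldl (gseg phonemes) []

-- ===== PRECONDITION & SPEC =====
def Spec_identify_phonemes (s : String) (phonemes : List String) (out : List String) : Prop := out = identify_phonemes_alt s phonemes
instance (s : String) (phonemes : List String) (out : List String) : Decidable (Spec_identify_phonemes s phonemes out) := by unfold Spec_identify_phonemes; infer_instance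

-- ===== CLAIM (what is proved, stated in full; the proofs are below) =====
def Claim_equal_identify_phonemes : Prop := ∀ (s : String) (phonemes : List String), Dom_identify_phonemes s phonemes → Spec_identify_phonemes s phonemes (identify_phonemes s phonemes)

-- ===== LEMMAS AND PROOFS =====

-- Reference recursive tokenizer (proof device): both ports are shown equal to it.
def R (phonemes : List String) (res : List String) (cur : List Char) :
    List Char → List String
  | [] => if cur.length > 0 then res ++ [String.ofList cur] else res
  | c :: cs =>
    if String.ofList [c] ∉ phonemes then
      R phonemes (if cur.length > 0 then res ++ [String.ofList cur] else res) [] cs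
    else if String.ofList (cur ++ [c]) ∉ phonemes then
      R phonemes (res ++ [String.ofList cur]) [c] cs
    else
      R phonemes res (cur ++ [c]) cs

-- every nonempty prefix of cur is a phoneme
def Pref (phonemes : List String) (cur : List Char) : Prop :=
  ∀ p : List Char, p ≠ [] → p <+: cur → String.ofList p ∈ phonemes

lemma Pref_single {phonemes : List String} {c : Char}
    (h : String.ofList [c] ∈ phonemes) : Pref phonemes [c] := by
  intro p hp hpre
  have h2 : p = [] ++ [c] ∨ p <+: ([] : List Char) :=
    List.prefix_concat_iff.mp (by simpa using hpre)
  rcases h2 with h1 | h1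
  · simpa [h1] using h
  · exact absurd (List.prefix_nil.mp h1) hp

lemma Pref_snoc {phonemes : List String} {cur : List Char} {c : Char}
    (hp : Pref phonemes cur) (h : String.ofList (cur ++ [c]) ∈ phonemes) :
    Pref phonemes (cur ++ [c]) := by
  intro p hne hpre
  rcases List.prefix_concat_iff.mp hpre with h1 | h1
  · simpa [h1] using h
  · exact hp p hne h1

-- L_A: A's foldl+final-flush equals R.
lemma A_eq_R (phonemes : List String) :
    ∀ (cs : List Char) (res : List String) (cur : List Char),
      (let p := cs.foldl (aStep phonemes) (res, cur);
        if p.2.length > 0 then p.1 ++ [String.ofList p.2] else p.1) = R phonemes res cur cs := by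
  intro cs
  induction cs with
  | nil => intro res cur; simp [R]
  | cons c cs ih =>
    intro res cur
    by_cases hc : String.ofList [c] ∈ phonemes
    · by_cases ht : String.ofList (cur ++ [c]) ∈ phonemes
      · have ht2 : String.ofList cur ++ String.ofList [c] ∈ phonemes := by simpa using ht
        simpa [R, aStep, hc, ht, ht2] using ih res (cur ++ [c])
      · have ht2 : String.ofList cur ++ String.ofList [c] ∉ phonemes := by simpa using ht
        simpa [R, aStep, hc, ht, ht2] using ih (res ++ [String.ofList cur]) [c]
    · simpa [R, aStep, hc] using
        ih (if cur.length > 0 then res ++ [String.ofList cur] else res) []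

-- L1: greedy consumes a fully-phonemic prefix without emitting anything.
lemma greedy_skip (phonemes : List String) :
    ∀ (ys cur : List Char) (out : List String) (xs : List Char),
      cur ≠ [] → Pref phonemes (cur ++ ys) →
      (ys ++ xs).foldl (gstep phonemes) (out, cur) = xs.foldl (gstep phonemes) (out, cur ++ ys) := by
  intro ys
  induction ys with
  | nil => intro cur out xs _ _; simp
  | cons y ys ih =>
    intro cur out xs hne hpref
    have hm : String.ofList (cur ++ [y]) ∈ phonemes := by
      refine hpref (cur ++ [y]) (by simp [hne]) ?_
      exact ⟨ys, by simp⟩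
    have hpref' : Pref phonemes ((cur ++ [y]) ++ ys) := by
      simpa using hpref
    have hm2 : String.ofList cur ++ String.ofList [y] ∈ phonemes := by simpa using hm
    have := ih (cur ++ [y]) out xs (by simp) hpref'
    simpa [gstep, hm, hm2] using this

-- gseg on a fully-phonemic segment emits exactly that segment as one token.
lemma gseg_whole (phonemes : List String) (cur : List Char) (out : List String)
    (hne : cur ≠ []) (hpref : Pref phonemes cur) :
    gseg phonemes out cur = out ++ [String.ofList cur] := by
  obtain ⟨c0, t, rfl⟩ := List.exists_cons_of_ne_nil hne
  have := greedy_skip phonemes t [c0] out [] (by simp) (by simpa using hpref)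
  simp only [List.append_nil] at this
  simp [gseg, this]

-- L3: a failed greedy extension splits the segment's output.
lemma gseg_split (phonemes : List String) (cur : List Char) (c : Char) (u : List Char)
    (out : List String) (hne : cur ≠ []) (hpref : Pref phonemes cur)
    (hfail : String.ofList (cur ++ [c]) ∉ phonemes) :
    gseg phonemes out (cur ++ c :: u) = gseg phonemes (out ++ [String.ofList cur]) (c :: u) := by
  obtain ⟨c0, t, rfl⟩ := List.exists_cons_of_ne_nil hne
  have h1 := greedy_skip phonemes t [c0] out (c :: u) (by simp) (by simpa using hpref)
  have hf : String.ofList (c0 :: (t ++ [c])) ∉ phonemes := by simpa using hfail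
  simp [gseg, h1, gstep, hf]

-- H: segment accumulator homomorphism for phase 1.
lemma p1_homo (phonemes : List String) :
    ∀ (cs : List Char) (segs : List (List Char)) (run : List Char),
      cs.foldl (p1step phonemes) (segs, run)
        = (segs ++ (cs.foldl (p1step phonemes) ([], run)).1,
           (cs.foldl (p1step phonemes) ([], run)).2) := by
  intro cs
  induction cs with
  | nil => intro segs run; simp
  | cons c cs ih =>
    intro segs run
    by_cases hc : String.ofList [c] ∈ phonemes
    · simpa [p1step, hc] using ih segs (run ++ [c])
    · by_cases hr : run = []
      · simpa [p1step, hc, hr] using ih segs []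
      · have e1 : p1step phonemes (segs, run) c = (segs ++ [run], []) := by
          simp [p1step, hc, hr]
        have e2 : p1step phonemes ([], run) c = ([run], []) := by
          simp [p1step, hc, hr]
        simp only [List.foldl_cons, e1, e2, ih (segs ++ [run]) [], ih [run] []]
        simp

-- segmentation-with-pending-run, as the proofs see it
def pcont (phonemes : List String) (run : List Char) (cs : List Char) : List (List Char) :=
  let p := cs.foldl (p1step phonemes) ([], run)
  if p.2 ≠ [] then p.1 ++ [p.2] else p.1

lemma pcont_mem (phonemes : List String) (run : List Char) (c : Char) (cs : List Char)
    (hc : String.ofList [c] ∈ phonemes) :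
    pcont phonemes run (c :: cs) = pcont phonemes (run ++ [c]) cs := by
  simp [pcont, p1step, hc]

lemma pcont_boundary (phonemes : List String) (run : List Char) (c : Char) (cs : List Char)
    (hc : String.ofList [c] ∉ phonemes) :
    pcont phonemes run (c :: cs)
      = (if run ≠ [] then [run] else []) ++ pcont phonemes [] cs := by
  by_cases hr : run = []
  · simp [pcont, p1step, hc, hr]
  · have e : p1step phonemes ([], run) c = ([run], []) := by simp [p1step, hc, hr]
    simp only [pcont, List.foldl_cons, e]
    rw [p1_homo phonemes cs [run] []]
    simp only [if_pos hr]
    split <;> simp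

-- L4: difference confined to the first segment's prefix propagates.
lemma pcont_split (phonemes : List String) (cur : List Char) (c : Char)
    (hne : cur ≠ []) (hpref : Pref phonemes cur)
    (hfail : String.ofList (cur ++ [c]) ∉ phonemes) :
    ∀ (cs u : List Char) (res : List String),
      (pcont phonemes (cur ++ c :: u) cs).foldl (gseg phonemes) res
        = (pcont phonemes (c :: u) cs).foldl (gseg phonemes) (res ++ [String.ofList cur]) := by
  intro cs
  induction cs with
  | nil =>
    intro u res
    simp only [pcont, List.foldl_nil]
    simp [List.foldl, gseg_split phonemes cur c u res hne hpref hfail]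
  | cons d cs ih =>
    intro u res
    by_cases hd : String.ofList [d] ∈ phonemes
    · rw [pcont_mem _ _ _ _ hd, pcont_mem _ _ _ _ hd]
      have : (cur ++ c :: u) ++ [d] = cur ++ c :: (u ++ [d]) := by simp
      rw [this]
      have : (c :: u) ++ [d] = c :: (u ++ [d]) := by simp
      rw [this]
      exact ih (u ++ [d]) res
    · rw [pcont_boundary _ _ _ _ hd, pcont_boundary _ _ _ _ hd]
      simp only [if_pos (by simp : cur ++ c :: u ≠ []), if_pos (by simp : c :: u ≠ [])]
      simp only [List.foldl_append, List.foldl_cons, List.foldl_nil]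
      rw [gseg_split phonemes cur c u res hne hpref hfail]

-- L_B: B's phase-2 fold over the segmentation-with-pending-run equals R.
lemma B_eq_R (phonemes : List String) :
    ∀ (cs : List Char) (res : List String) (cur : List Char),
      (cur = [] ∨ (cur ≠ [] ∧ Pref phonemes cur)) →
      (pcont phonemes cur cs).foldl (gseg phonemes) res = R phonemes res cur cs := by
  intro cs
  induction cs with
  | nil =>
    intro res cur h
    rcases h with h | ⟨hne, hpref⟩
    · simp [pcont, R, h]
    · simp only [pcont, List.foldl_nil, if_pos hne]
      simp [List.foldl, gseg_whole phonemes cur res hne hpref, R,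
        List.length_pos_iff.mpr hne]
  | cons c cs ih =>
    intro res cur h
    by_cases hc : String.ofList [c] ∈ phonemes
    · by_cases ht : String.ofList (cur ++ [c]) ∈ phonemes
      · rw [pcont_mem _ _ _ _ hc]
        have hp' : Pref phonemes (cur ++ [c]) := by
          rcases h with h | ⟨_, hpref⟩
          · subst h; exact Pref_single (by simpa using hc)
          · exact Pref_snoc hpref ht
        rw [ih res (cur ++ [c]) (Or.inr ⟨by simp, hp'⟩)]
        have ht2 : String.ofList cur ++ String.ofList [c] ∈ phonemes := by simpa using ht
        simp [R, hc, ht2]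
      · have hne : cur ≠ [] := by
          intro hcur; subst hcur; simp at ht; exact ht hc
        rcases h with h | ⟨_, hpref⟩
        · exact absurd h hne
        rw [pcont_mem _ _ _ _ hc]
        have hsplit := pcont_split phonemes cur c hne hpref ht cs [] res
        have : cur ++ [c] = cur ++ c :: [] := by simp
        rw [this, hsplit,
          ih (res ++ [String.ofList cur]) [c] (Or.inr ⟨by simp, Pref_single hc⟩)]
        have ht2 : String.ofList cur ++ String.ofList [c] ∉ phonemes := by simpa using ht
        simp [R, hc, ht2]
    · rw [pcont_boundary _ _ _ _ hc]
      rcases h with h | ⟨hne, hpref⟩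
      · subst h
        rw [List.foldl_append]
        simp only [if_neg (by simp : ¬ ([] : List Char) ≠ []), List.foldl_nil]
        rw [ih res [] (Or.inl rfl)]
        simp [R, hc]
      · rw [List.foldl_append]
        simp only [if_pos hne, List.foldl_cons, List.foldl_nil]
        rw [gseg_whole phonemes cur res hne hpref, ih (res ++ [String.ofList cur]) [] (Or.inl rfl)]
        simp [R, hc, List.length_pos_iff.mpr hne]

-- ===== VERDICT (by name: the statement is the Claim_ definition above) =====
theorem identify_phonemes_spec : Claim_equal_identify_phonemes := by
  intro s phonemes _
  show identify_phonemes s phonemes = identify_phonemes_alt s phonemes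
  have hA := A_eq_R phonemes s.toList [] []
  have hB := B_eq_R phonemes s.toList [] [] (Or.inl rfl)
  simpa [identify_phonemes, identify_phonemes_alt, pcont] using hA.trans hB.symm
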